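-- pv_equiv track=rewrite | github.com/sajalbhattarai/margie | processing/containers/rasttk/scripts/generate_rast_tsv.py | match_variant_for_role
-- ===== SOURCE A (Python) =====
-- from typing import Dict, List, Tuple, Optional
--
-- def match_variant_for_role(
--     role: str,
--     subsystem_name: str,
--     variant_roles: Dict[Tuple[str, str], List[str]]
-- ) -> Tuple[str, str]:
--     """
--     Match a role to a specific variant
--     First tries the specified subsystem, then searches all subsystems
--     Returns: (variant_number, actual_subsystem_used)
--     """
--     # First try: exact subsystem match (preferred)
--     for (sub, variant), roles in variant_roles.items():
--         if sub == subsystem_name and role in roles: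
--             return variant, sub
--
--     # Second try: search all subsystems for this role
--     # (handles cases where subsystem name differs between mapping sources)
--     for (sub, variant), roles in variant_roles.items():
--         if role in roles:
--             return variant, sub
--
--     return '', ''
-- ===== SOURCE B (Python) =====
-- def match_variant_for_role(role, subsystem_name, variant_roles):
--     fallback = None
--     for (sub, variant), roles in variant_roles.items():
--         if sub == subsystem_name and role in roles:
--             return variant, sub
--         if fallback is None and role in roles:
--             fallback = (variant, sub)
--     return fallback if fallback is not None else ('', '')
-- ===== Notes on version B (the rewrite author's own statement) =====
-- stated objective: alternative
-- what changed: Replaces A's two full passes over variant_roles with a single pass that returns immediately on an exact subsystem match and latches the first any-subsystem match as a fallback returned only after the loop.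
import Mathlib
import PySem

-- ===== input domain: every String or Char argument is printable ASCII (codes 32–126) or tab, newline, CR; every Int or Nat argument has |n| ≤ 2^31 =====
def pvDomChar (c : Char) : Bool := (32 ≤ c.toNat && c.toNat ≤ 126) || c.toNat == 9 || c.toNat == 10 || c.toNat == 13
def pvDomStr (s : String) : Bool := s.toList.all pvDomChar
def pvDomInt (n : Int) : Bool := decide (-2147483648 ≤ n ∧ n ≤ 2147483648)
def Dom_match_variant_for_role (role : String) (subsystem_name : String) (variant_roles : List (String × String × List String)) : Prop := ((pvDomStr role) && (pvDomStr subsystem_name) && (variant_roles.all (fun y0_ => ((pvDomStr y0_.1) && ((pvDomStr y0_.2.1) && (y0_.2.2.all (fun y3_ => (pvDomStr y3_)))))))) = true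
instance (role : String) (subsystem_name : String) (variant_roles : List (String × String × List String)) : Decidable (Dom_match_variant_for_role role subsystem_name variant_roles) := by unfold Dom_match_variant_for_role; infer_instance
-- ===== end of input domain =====

-- B replaces A's two full passes with a single pass that returns on an exact match and latches the first any-match as a fallback; proved equal to A.


-- ===== PORT A =====
-- first loop of A: exact subsystem match
def pvA_exact (role : String) (subsystem_name : String) : List (String × String × List String) → Option (String × String)
  | [] => none
  | (sub, variant, roles) :: rest =>
    if sub = subsystem_name ∧ role ∈ roles then some (variant, sub)
    else pvA_exact role subsystem_name rest

-- second loop of A: any subsystem containing the role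
def pvA_any (role : String) : List (String × String × List String) → Option (String × String)
  | [] => none
  | (sub, variant, roles) :: rest =>
    if role ∈ roles then some (variant, sub)
    else pvA_any role rest

def match_variant_for_role (role : String) (subsystem_name : String) (variant_roles : List (String × String × List String)) : String × String :=
  match pvA_exact role subsystem_name variant_roles with
  | some p => p
  | none =>
    match pvA_any role variant_roles with
    | some p => p
    | none => ("", "")

-- ===== PORT B =====
-- single pass: early return on exact match, latch first any-match in `fb`
def pvB_loop (role : String) (subsystem_name : String) : List (String × String × List String) → Option (String × String) → String × String
  | [], fb => fb.getD ("", "")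
  | (sub, variant, roles) :: rest, fb =>
    if sub = subsystem_name ∧ role ∈ roles then (variant, sub)
    else if fb = none ∧ role ∈ roles then pvB_loop role subsystem_name rest (some (variant, sub))
    else pvB_loop role subsystem_name rest fb

def match_variant_for_role_alt (role : String) (subsystem_name : String) (variant_roles : List (String × String × List String)) : String × String :=
  pvB_loop role subsystem_name variant_roles none

-- ===== PRECONDITION & SPEC =====
def Spec_match_variant_for_role (role : String) (subsystem_name : String) (variant_roles : List (String × String × List String)) (out : String × String) : Prop := out = match_variant_for_role_alt role subsystem_name variant_roles
instance (role : String) (subsystem_name : String) (variant_roles : List (String × String × List String)) (out : String × String) : Decidable (Spec_match_variant_for_role role subsystem_name variant_roles out) := by unfold Spec_match_variant_for_role; infer_instance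

-- ===== CLAIM (what is proved, stated in full; the proofs are below) =====
def Claim_equal_match_variant_for_role : Prop := ∀ (role : String) (subsystem_name : String) (variant_roles : List (String × String × List String)), Dom_match_variant_for_role role subsystem_name variant_roles → Spec_match_variant_for_role role subsystem_name variant_roles (match_variant_for_role role subsystem_name variant_roles)

-- ===== LEMMAS AND PROOFS =====
-- invariant of B's loop: exact match wins; otherwise the latched fallback, else the first any-match, else ('','')
theorem pvB_loop_eq (role subsystem_name : String) (l : List (String × String × List String)) (fb : Option (String × String)) :
    pvB_loop role subsystem_name l fb =
      match pvA_exact role subsystem_name l with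
      | some p => p
      | none =>
        match fb with
        | some x => x
        | none =>
          match pvA_any role l with
          | some p => p
          | none => ("", "") := by
  induction l generalizing fb with
  | nil => cases fb <;> simp [pvB_loop, pvA_exact, pvA_any]
  | cons hd tl ih =>
    obtain ⟨sub, variant, roles⟩ := hd
    simp only [pvB_loop, pvA_exact, pvA_any]
    by_cases h1 : sub = subsystem_name ∧ role ∈ roles
    · simp [h1]
    · by_cases hr : role ∈ roles
      · have hs : ¬ sub = subsystem_name := fun h => h1 ⟨h, hr⟩
        cases fb <;> simp [hs, hr, ih]
      · cases fb <;> simp [h1, hr, ih]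

-- ===== VERDICT (by name: the statement is the Claim_ definition above) =====
theorem match_variant_for_role_spec : Claim_equal_match_variant_for_role := by
  intro role sn vr _
  unfold Spec_match_variant_for_role match_variant_for_role match_variant_for_role_alt
  rw [pvB_loop_eq]
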